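-- pv_equiv track=rewrite | github.com/kevinhui98/TIP102 | unit2Sess2.py | find_attractions
-- ===== SOURCE A (Python) =====
-- from collections import defaultdict
--
-- def find_attractions(tourist_list1, tourist_list2):
--   tl1_dict = defaultdict()
--   tl2_dict = defaultdict()
--   res = []
--
--   for i in range(len(tourist_list1)):
--       tl1_dict[tourist_list1[i]] = i
--
--   for i in range(len(tourist_list2)):
--       tl2_dict[tourist_list2[i]] = i
--
--   shared = []
--
--   if len(tourist_list1) < len(tourist_list2):
--       for i in range(len(tourist_list1)):
--           if tourist_list1[i] in tl2_dict:
--               shared.append(tourist_list1[i])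
--   else:
--       for i in range(len(tourist_list2)):
--           if tourist_list2[i] in tl1_dict:
--               shared.append(tourist_list2[i])
--
--   min_so_far = float('inf')
--
--   for attr in shared:
--       min_so_far = min(tl1_dict[attr] + tl2_dict[attr], min_so_far)
--
--   for attr in shared:
--       if min_so_far == tl1_dict[attr] + tl2_dict[attr]:
--           res.append(attr)
--   return res
-- ===== SOURCE B (Python) =====
-- def find_attractions(tourist_list1, tourist_list2):
--     d1 = {el: i for i, el in enumerate(tourist_list1)}
--     d2 = {el: i for i, el in enumerate(tourist_list2)}
--     shorter, other = (tourist_list1, d2) if len(tourist_list1) < len(tourist_list2) else (tourist_list2, d1)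
--     min_so_far = None
--     res = []
--     for el in shorter:
--         if el in other:
--             s = d1[el] + d2[el]
--             if min_so_far is None or s < min_so_far:
--                 min_so_far = s
--                 res = [el]
--             elif s == min_so_far:
--                 res.append(el)
--     return res
-- ===== Notes on version B (the rewrite author's own statement) =====
-- stated objective: simpler
-- what changed: A makes three separate passes over the shared elements (collect a shared list, fold a minimum over it, then filter it by the minimum); B builds the dicts with comprehensions and makes one streaming pass over the shorter list, maintaining the running minimum and the result list together (reset on a strictly smaller sum, append on a tie).
import Mathlib
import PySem

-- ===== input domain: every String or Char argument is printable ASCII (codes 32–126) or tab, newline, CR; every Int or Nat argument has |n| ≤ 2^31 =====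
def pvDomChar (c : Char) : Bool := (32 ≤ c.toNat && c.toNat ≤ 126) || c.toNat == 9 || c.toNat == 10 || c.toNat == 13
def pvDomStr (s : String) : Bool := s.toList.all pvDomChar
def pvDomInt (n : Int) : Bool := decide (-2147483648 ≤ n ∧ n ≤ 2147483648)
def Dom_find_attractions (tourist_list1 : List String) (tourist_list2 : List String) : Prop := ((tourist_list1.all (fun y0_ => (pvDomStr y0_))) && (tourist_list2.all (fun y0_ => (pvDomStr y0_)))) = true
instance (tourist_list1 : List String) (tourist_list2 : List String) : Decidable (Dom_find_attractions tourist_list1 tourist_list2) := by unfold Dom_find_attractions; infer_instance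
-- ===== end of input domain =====

-- B fuses A's three passes over the shared elements (collect, min-finding, collect-at-min)
-- into one streaming pass with a running minimum; objective: simpler (one pass, no
-- intermediate `shared` list). Neither version mutates its arguments.

-- ===== PORT A =====
-- for i in range(len(l)): d[l[i]] = i   (index i is always in range, so pyGetD's default is never used)
def pvDictOfA (l : List String) : PySem.Dict String Int :=
  (PySem.List.pyRange 0 (PySem.List.len l)).foldl
    (fun d i => d.insert (PySem.List.pyGetD l i "") i) PySem.Dict.empty

-- for i in range(len(l)): if l[i] in other: shared.append(l[i])
def pvSharedA (l : List String) (other : PySem.Dict String Int) : List String :=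
  (PySem.List.pyRange 0 (PySem.List.len l)).foldl
    (fun sh i => if other.contains (PySem.List.pyGetD l i "") then sh ++ [PySem.List.pyGetD l i ""] else sh) []

-- min_so_far = min(tl1_dict[attr] + tl2_dict[attr], min_so_far)   (none plays float('inf');
-- every attr of shared is a key of both dicts, so getD's default is never used)
def pvMinStepA (tl1 tl2 : PySem.Dict String Int) (m : Option Int) (attr : String) : Option Int :=
  some (match m with
        | none => tl1.getD attr 0 + tl2.getD attr 0
        | some mv => min (tl1.getD attr 0 + tl2.getD attr 0) mv)

-- if min_so_far == tl1_dict[attr] + tl2_dict[attr]: res.append(attr)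
def pvResStepA (tl1 tl2 : PySem.Dict String Int) (minO : Option Int) (res : List String) (attr : String) : List String :=
  if minO = some (tl1.getD attr 0 + tl2.getD attr 0) then res ++ [attr] else res

def find_attractions (tourist_list1 : List String) (tourist_list2 : List String) : List String :=
  let tl1_dict := pvDictOfA tourist_list1
  let tl2_dict := pvDictOfA tourist_list2
  let shared :=
    if PySem.List.len tourist_list1 < PySem.List.len tourist_list2 then
      pvSharedA tourist_list1 tl2_dict
    else
      pvSharedA tourist_list2 tl1_dict
  let min_so_far : Option Int := shared.foldl (pvMinStepA tl1_dict tl2_dict) none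
  shared.foldl (pvResStepA tl1_dict tl2_dict min_so_far) []

-- ===== PORT B =====
-- d = {el: i for i, el in enumerate(l)}
def pvDictOfB (l : List String) : PySem.Dict String Int :=
  (PySem.List.enumerate l).foldl (fun d p => d.insert p.2 p.1) PySem.Dict.empty

-- the body under the membership test: compare s = d1[el] + d2[el] with the running minimum
-- (min_so_far is None or s < min_so_far → reset; s == min_so_far → append; else keep)
def pvCoreB (d1 d2 : PySem.Dict String Int) (st : Option Int × List String) (el : String) :
    Option Int × List String :=
  let s := d1.getD el 0 + d2.getD el 0
  match st.1 with
  | none => (some s, [el])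
  | some m =>
      if s < m then (some s, [el])
      else if s = m then (some m, st.2 ++ [el])
      else st

-- for el in shorter: if el in other: …
def pvStepB (d1 d2 other : PySem.Dict String Int) (st : Option Int × List String) (el : String) :
    Option Int × List String :=
  if other.contains el then pvCoreB d1 d2 st el else st

def find_attractions_alt (tourist_list1 : List String) (tourist_list2 : List String) : List String :=
  let d1 := pvDictOfB tourist_list1
  let d2 := pvDictOfB tourist_list2
  let pr :=
    if PySem.List.len tourist_list1 < PySem.List.len tourist_list2 then (tourist_list1, d2)
    else (tourist_list2, d1)
  (pr.1.foldl (pvStepB d1 d2 pr.2) (none, [])).2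

-- ===== PRECONDITION & SPEC =====
def Spec_find_attractions (tourist_list1 : List String) (tourist_list2 : List String) (out : List String) : Prop := out = find_attractions_alt tourist_list1 tourist_list2
instance (tourist_list1 : List String) (tourist_list2 : List String) (out : List String) : Decidable (Spec_find_attractions tourist_list1 tourist_list2 out) := by unfold Spec_find_attractions; infer_instance

-- ===== CLAIM (what is proved, stated in full; the proofs are below) =====
def Claim_equal_find_attractions : Prop := ∀ (tourist_list1 : List String) (tourist_list2 : List String), Dom_find_attractions tourist_list1 tourist_list2 → Spec_find_attractions tourist_list1 tourist_list2 (find_attractions tourist_list1 tourist_list2)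

-- ===== LEMMAS AND PROOFS =====

-- the two dict-building loops build the same dict
theorem pvDictOf_eq (l : List String) : pvDictOfB l = pvDictOfA l := by
  unfold pvDictOfB pvDictOfA
  rw [PySem.List.enumerate_eq_map_pyRange l "", List.foldl_map]

-- A's shared-collecting loop is a filter of the list
theorem pvSharedA_eq_filter (l : List String) (other : PySem.Dict String Int) :
    pvSharedA l other = l.filter (fun x => other.contains x) := by
  unfold pvSharedA
  have hmap := List.foldl_map (f := fun j => PySem.List.pyGetD l j "")
    (g := fun (sh : List String) (x : String) => if other.contains x then sh ++ [x] else sh)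
    (l := PySem.List.pyRange 0 (PySem.List.len l)) (init := ([] : List String))
  rw [show (fun (sh : List String) (i : Int) =>
      if other.contains (PySem.List.pyGetD l i "") then sh ++ [PySem.List.pyGetD l i ""] else sh)
      = fun sh i => (fun (sh : List String) (x : String) => if other.contains x then sh ++ [x] else sh)
          sh ((fun j => PySem.List.pyGetD l j "") i) from rfl]
  rw [← hmap, PySem.List.map_pyGetD_pyRange_zero l ""]
  simpa using PySem.List.foldl_append_if (fun x => other.contains x) id l []

-- running minimum as a plain foldl of min
def pvMf (s : String → Int) (l : List String) (m : Int) : Int :=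
  l.foldl (fun acc x => min (s x) acc) m

theorem pvMf_le (s : String → Int) (l : List String) (m : Int) : pvMf s l m ≤ m := by
  induction l generalizing m with
  | nil => simp [pvMf]
  | cons x t ih =>
      have := ih (min (s x) m)
      simp only [pvMf, List.foldl_cons] at this ⊢
      exact le_trans this (min_le_right _ _)

-- A's min loop from a some-state
theorem pvAmin_some (tl1 tl2 : PySem.Dict String Int) (l : List String) (m : Int) :
    l.foldl (pvMinStepA tl1 tl2) (some m)
      = some (pvMf (fun x => tl1.getD x 0 + tl2.getD x 0) l m) := by
  induction l generalizing m with
  | nil => rfl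
  | cons x t ih =>
      simp only [List.foldl_cons, pvMinStepA, pvMf]
      simpa [pvMf] using ih (min (tl1.getD x 0 + tl2.getD x 0) m)

-- B's fused loop from a some-state: the running minimum becomes the global minimum; the
-- result list is reset iff the minimum improved, and collects the elements achieving it
theorem pvBcore_some (d1 d2 : PySem.Dict String Int) (l : List String) (m : Int) (res : List String) :
    l.foldl (pvCoreB d1 d2) (some m, res)
      = (some (pvMf (fun x => d1.getD x 0 + d2.getD x 0) l m),
         (if pvMf (fun x => d1.getD x 0 + d2.getD x 0) l m < m then [] else res)
           ++ l.filter (fun x => d1.getD x 0 + d2.getD x 0 = pvMf (fun x => d1.getD x 0 + d2.getD x 0) l m)) := by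
  set s : String → Int := fun x => d1.getD x 0 + d2.getD x 0 with hs
  induction l generalizing m res with
  | nil => simp [pvMf]
  | cons x t ih =>
      have hstep : pvCoreB d1 d2 (some m, res) x
          = if s x < m then (some (s x), [x])
            else if s x = m then (some m, res ++ [x]) else (some m, res) := rfl
      have hMle : pvMf s t (min (s x) m) ≤ min (s x) m := pvMf_le s t _
      have hM : pvMf s (x :: t) m = pvMf s t (min (s x) m) := rfl
      rw [List.foldl_cons, hstep, hM]
      by_cases h1 : s x < m
      · have hmin : min (s x) m = s x := min_eq_left (le_of_lt h1)
        rw [if_pos h1, ih (s x) [x], hmin]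
        have hlt : pvMf s t (s x) < m := lt_of_le_of_lt (by simpa [hmin] using hMle) h1
        rw [if_pos hlt]
        by_cases h2 : pvMf s t (s x) < s x
        · have hne' : ¬ (d1.getD x 0 + d2.getD x 0 = pvMf s t (s x)) := by
            have hsx : s x = d1.getD x 0 + d2.getD x 0 := rfl; have h2' : pvMf s t (s x) < s x := h2; omega
          simp [h2, hne']
        · have heq : pvMf s t (s x) = s x := le_antisymm (by simpa [hmin] using hMle) (by omega)
          have hx' : d1.getD x 0 + d2.getD x 0 = pvMf s t (s x) := heq.symm
          simp [h2, hx']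
      · by_cases h2 : s x = m
        · have hmin : min (s x) m = m := by omega
          rw [if_neg h1, if_pos h2, ih m (res ++ [x]), hmin]
          have hMle' : pvMf s t m ≤ m := by simpa [hmin] using hMle
          by_cases h3 : pvMf s t m < m
          · have hne' : ¬ (d1.getD x 0 + d2.getD x 0 = pvMf s t m) := by
              have hsx : s x = d1.getD x 0 + d2.getD x 0 := rfl; have h2' : s x = m := h2; omega
            simp [h3, hne']
          · have hx' : d1.getD x 0 + d2.getD x 0 = pvMf s t m := by
              have hsx : s x = d1.getD x 0 + d2.getD x 0 := rfl; have h2' : s x = m := h2; omega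
            simp [h3, hx']
        · have h3 : m < s x := by omega
          have hmin : min (s x) m = m := min_eq_right (le_of_lt h3)
          rw [if_neg h1, if_neg h2, ih m res, hmin]
          have hne' : ¬ (d1.getD x 0 + d2.getD x 0 = pvMf s t m) := by
            have hsx : s x = d1.getD x 0 + d2.getD x 0 := rfl
            have h3' : m < s x := h3
            have := pvMf_le s t m; omega
          simp [hne']

-- B's loop with its membership guard is B's core loop over the filtered list
theorem pvStepB_filter (d1 d2 other : PySem.Dict String Int) (l : List String)
    (st : Option Int × List String) :
    l.foldl (pvStepB d1 d2 other) st
      = (l.filter (fun x => other.contains x)).foldl (pvCoreB d1 d2) st := by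
  induction l generalizing st with
  | nil => rfl
  | cons x t ih =>
      simp only [List.foldl_cons, List.filter_cons, pvStepB]
      by_cases h : other.contains x
      · rw [if_pos h, ih]
        simp [h]
      · rw [if_neg h, ih]
        simp [h]

-- A's result loop is a filter by "sum equals the minimum"
theorem pvAres_filter (tl1 tl2 : PySem.Dict String Int) (sh : List String) (M : Int) :
    sh.foldl (pvResStepA tl1 tl2 (some M)) []
      = sh.filter (fun x => tl1.getD x 0 + tl2.getD x 0 = M) := by
  have h : pvResStepA tl1 tl2 (some M)
      = fun res (attr : String) =>
          if (fun x => decide (tl1.getD x 0 + tl2.getD x 0 = M)) attr then res ++ [id attr] else res := by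
    funext res attr
    unfold pvResStepA
    by_cases h : tl1.getD attr 0 + tl2.getD attr 0 = M
    · simp [h]
    · simp only [h, decide_false, Bool.false_eq_true, if_false]
      rw [if_neg (fun hM => h (Option.some.inj hM).symm)]
  rw [h, PySem.List.foldl_append_if (fun x => decide (tl1.getD x 0 + tl2.getD x 0 = M)) id sh []]
  simp

-- the whole thing, for an arbitrary shared list (written as a filter)
theorem pv_main (d1 d2 other : PySem.Dict String Int) (l : List String) :
    (l.foldl (pvStepB d1 d2 other) (none, [])).2
      = (l.filter (fun x => other.contains x)).foldl
          (pvResStepA d1 d2 ((l.filter (fun x => other.contains x)).foldl (pvMinStepA d1 d2) none)) [] := by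
  rw [pvStepB_filter]
  set s : String → Int := fun x => d1.getD x 0 + d2.getD x 0 with hs
  cases hsh : l.filter (fun x => other.contains x) with
  | nil => simp
  | cons x t =>
      have hminA : (x :: t).foldl (pvMinStepA d1 d2) none = some (pvMf s t (s x)) := by
        rw [show (x :: t).foldl (pvMinStepA d1 d2) none
              = t.foldl (pvMinStepA d1 d2) (some (s x)) from rfl]
        exact pvAmin_some d1 d2 t (s x)
      have hB : (x :: t).foldl (pvCoreB d1 d2) ((none : Option Int), ([] : List String))
          = (some (pvMf s t (s x)),
             (if pvMf s t (s x) < s x then [] else [x])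
               ++ t.filter (fun y => s y = pvMf s t (s x))) := by
        rw [show (x :: t).foldl (pvCoreB d1 d2) ((none : Option Int), ([] : List String))
              = t.foldl (pvCoreB d1 d2) (some (s x), [x]) from rfl]
        exact pvBcore_some d1 d2 t (s x) [x]
      rw [hB, hminA, pvAres_filter d1 d2 (x :: t) (pvMf s t (s x))]
      have hle : pvMf s t (s x) ≤ s x := pvMf_le s t _
      rw [List.filter_cons]
      by_cases h : pvMf s t (s x) < s x
      · have hr : pvMf (fun y => d1.getD y 0 + d2.getD y 0) t (d1.getD x 0 + d2.getD x 0)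
            < d1.getD x 0 + d2.getD x 0 := h
        have hner : ¬ (d1.getD x 0 + d2.getD x 0
            = pvMf (fun y => d1.getD y 0 + d2.getD y 0) t (d1.getD x 0 + d2.getD x 0)) := by omega
        simp only [hs]
        simp [hr, hner]
      · have hnr : ¬ pvMf (fun y => d1.getD y 0 + d2.getD y 0) t (d1.getD x 0 + d2.getD x 0)
            < d1.getD x 0 + d2.getD x 0 := h
        have hler : pvMf (fun y => d1.getD y 0 + d2.getD y 0) t (d1.getD x 0 + d2.getD x 0)
            ≤ d1.getD x 0 + d2.getD x 0 := hle
        have hxr : d1.getD x 0 + d2.getD x 0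
            = pvMf (fun y => d1.getD y 0 + d2.getD y 0) t (d1.getD x 0 + d2.getD x 0) := by omega
        simp only [hs]
        have hbx : decide (d1.getD x 0 + d2.getD x 0
            = pvMf (fun y => d1.getD y 0 + d2.getD y 0) t (d1.getD x 0 + d2.getD x 0)) = true :=
          decide_eq_true hxr
        rw [if_neg hnr, if_pos hbx]
        simp

-- ===== VERDICT (by name: the statement is the Claim_ definition above) =====
theorem find_attractions_spec : Claim_equal_find_attractions := by
  intro l1 l2 _
  unfold Spec_find_attractions find_attractions find_attractions_alt
  simp only [pvDictOf_eq]
  by_cases h : PySem.List.len l1 < PySem.List.len l2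
  · simp only [if_pos h]
    rw [pvSharedA_eq_filter l1 (pvDictOfA l2),
        pv_main (pvDictOfA l1) (pvDictOfA l2) (pvDictOfA l2) l1]
  · simp only [if_neg h]
    rw [pvSharedA_eq_filter l2 (pvDictOfA l1),
        pv_main (pvDictOfA l1) (pvDictOfA l2) (pvDictOfA l1) l2]
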